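-- pv_equiv track=rewrite | github.com/AkashDeepSinghJassal/unmapped | backend/agents/opportunity_agent.py | _format_growth_data
-- ===== SOURCE A (Python) =====
-- def _format_growth_data(growth: list[dict]) -> str:
--     if not growth:
--         return "No employment growth data available."
--     lines = []
--     seen = set()
--     for g in growth:
--         sc = g.get("sector_code", "?")
--         if sc in seen:
--             continue
--         seen.add(sc)
--         lines.append(
--             f"  Sector {sc}: {g.get('yoy_growth_pct','N/A')}% growth (year {g.get('year','?')})"
--         )
--         if len(lines) >= 8:
--             break
--     return "\n".join(lines)
-- ===== SOURCE B (Python) =====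
-- def _format_growth_data(growth: list[dict]) -> str:
--     if not growth:
--         return "No employment growth data available."
--     first = {}
--     for g in growth:
--         sc = g.get("sector_code", "?")
--         if sc not in first:
--             first[sc] = g
--     return "\n".join(
--         f"  Sector {sc}: {g.get('yoy_growth_pct','N/A')}% growth (year {g.get('year','?')})"
--         for sc, g in list(first.items())[:8]
--     )
-- ===== Notes on version B (the rewrite author's own statement) =====
-- stated objective: simpler
-- what changed: Separates deduplication (an order-preserving dict of first occurrence per sector_code) from truncation/formatting (slice the first 8 items and format) instead of one interleaved loop with a seen-set, append and break.
import Mathlib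
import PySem

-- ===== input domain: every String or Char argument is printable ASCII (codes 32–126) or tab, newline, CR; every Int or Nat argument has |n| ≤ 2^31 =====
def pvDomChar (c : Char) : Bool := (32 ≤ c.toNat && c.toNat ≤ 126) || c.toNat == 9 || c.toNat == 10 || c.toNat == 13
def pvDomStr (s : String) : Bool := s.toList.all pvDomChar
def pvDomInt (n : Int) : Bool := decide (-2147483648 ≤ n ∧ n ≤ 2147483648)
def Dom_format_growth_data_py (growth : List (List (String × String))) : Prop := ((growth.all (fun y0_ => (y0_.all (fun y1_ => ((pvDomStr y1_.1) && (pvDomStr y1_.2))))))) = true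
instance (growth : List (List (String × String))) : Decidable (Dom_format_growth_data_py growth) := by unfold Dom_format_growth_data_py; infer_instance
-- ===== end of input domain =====

-- B separates deduplication (first-occurrence dict per sector_code) from truncation/formatting
-- (slice first 8, format, join) — simpler decomposition; same return value.

-- g.get(k, dflt) on a dict argument (assoc list, first match)
def pvGet (g : List (String × String)) (k dflt : String) : String :=
  (PySem.Dict.mk g).getD k dflt

-- the shared f-string body
def fgdLine (sc : String) (g : List (String × String)) : String :=
  "  Sector " ++ sc ++ ": " ++ pvGet g "yoy_growth_pct" "N/A" ++ "% growth (year "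
    ++ pvGet g "year" "?" ++ ")"

-- ===== PORT A =====
-- A's loop: seen-set, append, break at 8
def fgdLoopA : List (List (String × String)) → PySem.Set String → List String → List String
  | [], _, lines => lines
  | g :: rest, seen, lines =>
    let sc := pvGet g "sector_code" "?"
    if PySem.Set.contains seen sc then fgdLoopA rest seen lines
    else
      let lines' := lines ++ [fgdLine sc g]
      if 8 ≤ lines'.length then lines'
      else fgdLoopA rest (PySem.Set.add seen sc) lines'

def format_growth_data_py (growth : List (List (String × String))) : String :=
  if growth = [] then "No employment growth data available."
  else PySem.Str.join "\n" (fgdLoopA growth PySem.Set.empty [])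

-- ===== PORT B =====
-- B pass 1: order-preserving dict mapping each sector_code to the first g seen for it
def fgdFirst (gs : List (List (String × String))) (d : PySem.Dict String (List (String × String))) :
    PySem.Dict String (List (String × String)) :=
  gs.foldl (fun d g =>
    let sc := pvGet g "sector_code" "?"
    if d.contains sc then d else d.insert sc g) d

def format_growth_data_py_alt (growth : List (List (String × String))) : String :=
  if growth = [] then "No employment growth data available."
  else PySem.Str.join "\n"
    (((fgdFirst growth PySem.Dict.empty).items.take 8).map (fun p => fgdLine p.1 p.2))

-- ===== PRECONDITION & SPEC =====
def Spec_format_growth_data_py (growth : List (List (String × String))) (out : String) : Prop := out = format_growth_data_py_alt growth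
instance (growth : List (List (String × String))) (out : String) : Decidable (Spec_format_growth_data_py growth out) := by unfold Spec_format_growth_data_py; infer_instance

-- ===== CLAIM (what is proved, stated in full; the proofs are below) =====
def Claim_equal_format_growth_data_py : Prop := ∀ (growth : List (List (String × String))), Dom_format_growth_data_py growth → Spec_format_growth_data_py growth (format_growth_data_py growth)

-- ===== LEMMAS AND PROOFS =====

-- B's fold only appends items (it inserts only fresh keys)
theorem fgdFirst_items_prefix (gs : List (List (String × String)))
    (d : PySem.Dict String (List (String × String))) :
    ∃ e, (fgdFirst gs d).items = d.items ++ e := by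
  induction gs generalizing d with
  | nil => exact ⟨[], by simp [fgdFirst]⟩
  | cons g rest ih =>
    simp only [fgdFirst, List.foldl_cons]
    by_cases hc : (PySem.Dict.contains d (pvGet g "sector_code" "?")) = true
    · simpa [hc] using ih d
    · simp only [Bool.not_eq_true] at hc
      obtain ⟨e, he⟩ := ih (d.insert (pvGet g "sector_code" "?") g)
      refine ⟨(pvGet g "sector_code" "?", g) :: e, ?_⟩
      rw [if_neg (by simp [hc])]
      show (fgdFirst rest _).items = _
      rw [he, PySem.Dict.items_insert_of_not_contains _ _ hc]
      simp

theorem set_contains_keys (d : PySem.Dict String (List (String × String))) (sc : String) :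
    PySem.Set.contains d.keys sc = d.contains sc := by
  rw [PySem.Dict.contains_eq_decide_mem_keys]
  simp [PySem.Set.contains]

-- loop invariant: A's loop from state (d.keys, formatted d.items) equals B's take-8-then-format
theorem fgdLoopA_eq (gs : List (List (String × String)))
    (d : PySem.Dict String (List (String × String))) (hlt : d.items.length < 8) :
    fgdLoopA gs d.keys (d.items.map (fun p => fgdLine p.1 p.2))
      = ((fgdFirst gs d).items.take 8).map (fun p => fgdLine p.1 p.2) := by
  induction gs generalizing d with
  | nil =>
    simp [fgdLoopA, fgdFirst, List.take_of_length_le (Nat.le_of_lt hlt)]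
  | cons g rest ih =>
    simp only [fgdLoopA, fgdFirst, List.foldl_cons, set_contains_keys]
    by_cases hc : (PySem.Dict.contains d (pvGet g "sector_code" "?")) = true
    · simpa [hc, fgdFirst] using ih d hlt
    · simp only [Bool.not_eq_true] at hc
      have hitems := PySem.Dict.items_insert_of_not_contains d g hc
      have hkeys := PySem.Dict.keys_insert_of_not_contains d g hc
      have hmap : d.items.map (fun p => fgdLine p.1 p.2) ++ [fgdLine (pvGet g "sector_code" "?") g]
          = (d.insert (pvGet g "sector_code" "?") g).items.map (fun p => fgdLine p.1 p.2) := by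
        simp [hitems]
      have hnm : pvGet g "sector_code" "?" ∉ d.keys := by
        rw [PySem.Dict.contains_eq_decide_mem_keys] at hc; simpa using hc
      have hadd : PySem.Set.add d.keys (pvGet g "sector_code" "?")
          = (d.insert (pvGet g "sector_code" "?") g).keys := by
        simp [PySem.Set.add, hkeys]
        exact hnm
      have hlen : (d.insert (pvGet g "sector_code" "?") g).items.length = d.items.length + 1 := by
        simp [hitems]
      simp only [hc, Bool.false_eq_true, if_false, hmap, hadd]
      by_cases h8 : 8 ≤ ((d.insert (pvGet g "sector_code" "?") g).items.map
          (fun p => fgdLine p.1 p.2)).length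
      · -- break: the new dict already has 8 items; the rest of B's fold only appends
        simp only [List.length_map] at h8
        have heq : (d.insert (pvGet g "sector_code" "?") g).items.length = 8 := by omega
        obtain ⟨e, he⟩ := fgdFirst_items_prefix rest (d.insert (pvGet g "sector_code" "?") g)
        have he' : (List.foldl
            (fun d g => if d.contains (pvGet g "sector_code" "?") = true then d
              else d.insert (pvGet g "sector_code" "?") g)
            (d.insert (pvGet g "sector_code" "?") g) rest).items
            = (d.insert (pvGet g "sector_code" "?") g).items ++ e := he
        rw [if_pos (by simpa using h8), he', ← heq, List.take_left]
      · rw [if_neg h8]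
        simp only [List.length_map] at h8
        exact ih _ (by omega)

-- ===== VERDICT (by name: the statement is the Claim_ definition above) =====
theorem format_growth_data_py_spec : Claim_equal_format_growth_data_py := by
  intro growth _
  unfold Spec_format_growth_data_py format_growth_data_py format_growth_data_py_alt
  by_cases h : growth = []
  · simp [h]
  · rw [if_neg h, if_neg h]
    have h2 := congrArg (PySem.Str.join "\n")
      (fgdLoopA_eq growth PySem.Dict.empty (by simp [PySem.Dict.empty]))
    simpa [PySem.Dict.empty, PySem.Set.empty] using h2
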